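-- pv_equiv track=rewrite | github.com/pypi-data/pypi-mirror-106 | packages/Catactor/Catactor-0.1.1.tar.gz/Catactor-0.1.1/script/visualization/marker_gene_plot.py | convert_sample_to_label
-- ===== SOURCE A (Python) =====
-- def convert_sample_to_label(samples, annotated, problem=''):
--     if annotated is None:
--         labels = ['1_EX' if 'EX' in c else '2_IN' if 'IN' in c else '3_NA' if 'NA' in c else '0_NN' for c in samples]
--     else:
--         samples = [annotated[c] if c in annotated else '3_NA' for c in samples]
--         labels = ['1_EX' if 'EX' in c else '2_IN' if 'IN' in c else '3_NA' if 'NA' in c else '0_NN' for c in samples]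
--     if problem != '':
--         if 'neuron' in problem:
--             labels = ['0_N' if 'NN' in c else '1_P' if 'EX' in c or 'IN' in c else '3_NA' for c in labels]
--         else:
--             labels = ['1_EX' if 'EX' in c else '2_IN' if 'IN' in c else '3_NA' for c in labels]
--     return labels
-- ===== SOURCE B (Python) =====
-- def convert_sample_to_label(samples, annotated, problem=''):
--     # The mode transform only ever sees the four base labels, so it is a
--     # fixed 4-entry table (class index: 0=EX, 1=IN, 2=NA, 3=NN) computed once.
--     if problem == '':
--         table = ['1_EX', '2_IN', '3_NA', '0_NN']
--     elif 'neuron' in problem: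
--         table = ['1_P', '1_P', '3_NA', '0_N']
--     else:
--         table = ['1_EX', '2_IN', '3_NA', '3_NA']
--     out = []
--     for c in samples:
--         if annotated is not None:
--             c = annotated.get(c, '3_NA')
--         if 'EX' in c:
--             k = 0
--         elif 'IN' in c:
--             k = 1
--         elif 'NA' in c:
--             k = 2
--         else:
--             k = 3
--         out.append(table[k])
--     return out
-- ===== Notes on version B (the rewrite author's own statement) =====
-- stated objective: alternative
-- what changed: A builds intermediate label lists and re-runs substring checks on the generated base labels in a second pass; B precomputes a fixed 4-entry class-to-output table from the problem mode once and classifies each sample directly to a table index, so the second substring pass disappears.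
import Mathlib
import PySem

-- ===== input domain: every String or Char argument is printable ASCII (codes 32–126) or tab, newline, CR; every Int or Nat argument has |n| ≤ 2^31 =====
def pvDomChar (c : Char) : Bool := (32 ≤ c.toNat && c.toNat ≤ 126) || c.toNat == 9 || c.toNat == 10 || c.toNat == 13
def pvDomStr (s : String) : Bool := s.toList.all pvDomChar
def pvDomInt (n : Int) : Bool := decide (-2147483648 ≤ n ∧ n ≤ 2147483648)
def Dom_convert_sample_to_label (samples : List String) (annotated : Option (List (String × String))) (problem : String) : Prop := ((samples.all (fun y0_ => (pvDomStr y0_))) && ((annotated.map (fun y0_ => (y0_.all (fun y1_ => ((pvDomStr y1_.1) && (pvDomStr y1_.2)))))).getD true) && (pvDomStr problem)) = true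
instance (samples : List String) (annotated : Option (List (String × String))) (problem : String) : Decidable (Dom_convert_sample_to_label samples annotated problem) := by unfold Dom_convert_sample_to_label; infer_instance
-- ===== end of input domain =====

-- B replaces A's staged label rebuilds by a 4-entry class-to-output table computed once from the mode (objective: alternative decomposition).

-- ===== PORT A =====
-- literal transliteration: build labels (with the annotated remap pass), then the problem transform pass
def convert_sample_to_label (samples : List String) (annotated : Option (List (String × String))) (problem : String) : List String :=
  let labels :=
    match annotated with
    | none =>
        samples.map (fun c =>
          if PySem.Str.isIn "EX" c then "1_EX"
          else if PySem.Str.isIn "IN" c then "2_IN"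
          else if PySem.Str.isIn "NA" c then "3_NA"
          else "0_NN")
    | some ann =>
        let samples2 := samples.map (fun c =>
          if (List.lookup c ann).isSome then (List.lookup c ann).getD "3_NA" else "3_NA")
        samples2.map (fun c =>
          if PySem.Str.isIn "EX" c then "1_EX"
          else if PySem.Str.isIn "IN" c then "2_IN"
          else if PySem.Str.isIn "NA" c then "3_NA"
          else "0_NN")
  if problem ≠ "" then
    if PySem.Str.isIn "neuron" problem then
      labels.map (fun c =>
        if PySem.Str.isIn "NN" c then "0_N"
        else if PySem.Str.isIn "EX" c || PySem.Str.isIn "IN" c then "1_P"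
        else "3_NA")
    else
      labels.map (fun c =>
        if PySem.Str.isIn "EX" c then "1_EX"
        else if PySem.Str.isIn "IN" c then "2_IN"
        else "3_NA")
  else labels

-- ===== PORT B =====
-- table-driven: mode resolved once into a 4-entry table, each sample classified to an index
def convert_sample_to_label_alt (samples : List String) (annotated : Option (List (String × String))) (problem : String) : List String :=
  let table : List String :=
    if problem = "" then ["1_EX", "2_IN", "3_NA", "0_NN"]
    else if PySem.Str.isIn "neuron" problem then ["1_P", "1_P", "3_NA", "0_N"]
    else ["1_EX", "2_IN", "3_NA", "3_NA"]
  samples.map (fun c =>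
    let c' := match annotated with
      | none => c
      | some ann => (List.lookup c ann).getD "3_NA"
    let k : Nat :=
      if PySem.Str.isIn "EX" c' then 0
      else if PySem.Str.isIn "IN" c' then 1
      else if PySem.Str.isIn "NA" c' then 2
      else 3
    table.getD k "")

-- ===== PRECONDITION & SPEC =====
def Spec_convert_sample_to_label (samples : List String) (annotated : Option (List (String × String))) (problem : String) (out : List String) : Prop := out = convert_sample_to_label_alt samples annotated problem
instance (samples : List String) (annotated : Option (List (String × String))) (problem : String) (out : List String) : Decidable (Spec_convert_sample_to_label samples annotated problem out) := by unfold Spec_convert_sample_to_label; infer_instance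

-- ===== CLAIM (what is proved, stated in full; the proofs are below) =====
def Claim_equal_convert_sample_to_label : Prop := ∀ (samples : List String) (annotated : Option (List (String × String))) (problem : String), Dom_convert_sample_to_label samples annotated problem → Spec_convert_sample_to_label samples annotated problem (convert_sample_to_label samples annotated problem)

-- ===== LEMMAS AND PROOFS =====
-- class index of a string under the EX/IN/NA priority chain
def pvIdx (c : String) : Nat :=
  if PySem.Str.isIn "EX" c then 0
  else if PySem.Str.isIn "IN" c then 1
  else if PySem.Str.isIn "NA" c then 2
  else 3

theorem elem_base (c : String) :
    (if PySem.Str.isIn "EX" c then "1_EX"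
     else if PySem.Str.isIn "IN" c then "2_IN"
     else if PySem.Str.isIn "NA" c then "3_NA"
     else "0_NN")
      = (["1_EX", "2_IN", "3_NA", "0_NN"] : List String).getD (pvIdx c) "" := by
  unfold pvIdx
  by_cases h1 : PySem.Str.isIn "EX" c <;> by_cases h2 : PySem.Str.isIn "IN" c <;>
    by_cases h3 : PySem.Str.isIn "NA" c <;>
  · try simp only [Bool.not_eq_true] at h1 h2 h3
    simp only [h1, h2, h3]
    decide

theorem elem_neuron (c : String) :
    (if PySem.Str.isIn "NN" ((["1_EX", "2_IN", "3_NA", "0_NN"] : List String).getD (pvIdx c) "") then "0_N"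
     else if PySem.Str.isIn "EX" ((["1_EX", "2_IN", "3_NA", "0_NN"] : List String).getD (pvIdx c) "")
          || PySem.Str.isIn "IN" ((["1_EX", "2_IN", "3_NA", "0_NN"] : List String).getD (pvIdx c) "") then "1_P"
     else "3_NA")
      = (["1_P", "1_P", "3_NA", "0_N"] : List String).getD (pvIdx c) "" := by
  unfold pvIdx
  by_cases h1 : PySem.Str.isIn "EX" c <;> by_cases h2 : PySem.Str.isIn "IN" c <;>
    by_cases h3 : PySem.Str.isIn "NA" c <;>
  · try simp only [Bool.not_eq_true] at h1 h2 h3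
    simp only [h1, h2, h3]
    decide

theorem elem_binary (c : String) :
    (if PySem.Str.isIn "EX" ((["1_EX", "2_IN", "3_NA", "0_NN"] : List String).getD (pvIdx c) "") then "1_EX"
     else if PySem.Str.isIn "IN" ((["1_EX", "2_IN", "3_NA", "0_NN"] : List String).getD (pvIdx c) "") then "2_IN"
     else "3_NA")
      = (["1_EX", "2_IN", "3_NA", "3_NA"] : List String).getD (pvIdx c) "" := by
  unfold pvIdx
  by_cases h1 : PySem.Str.isIn "EX" c <;> by_cases h2 : PySem.Str.isIn "IN" c <;>
    by_cases h3 : PySem.Str.isIn "NA" c <;>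
  · try simp only [Bool.not_eq_true] at h1 h2 h3
    simp only [h1, h2, h3]
    decide

theorem convert_sample_to_label_eq (samples : List String) (annotated : Option (List (String × String))) (problem : String) :
    convert_sample_to_label samples annotated problem = convert_sample_to_label_alt samples annotated problem := by
  unfold convert_sample_to_label convert_sample_to_label_alt
  have hget : ∀ (c : String) (ann : List (String × String)),
      (if (List.lookup c ann).isSome then (List.lookup c ann).getD "3_NA" else "3_NA")
        = (List.lookup c ann).getD "3_NA" := by
    intro c ann; cases List.lookup c ann <;> simp
  by_cases h : problem = ""
  · rw [if_neg (by simp [h]), if_pos h]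
    cases annotated with
    | none =>
        exact List.map_congr_left fun c _ => by rw [elem_base c]; rfl
    | some ann =>
        simp only [List.map_map]
        exact List.map_congr_left fun c _ => by
          simp only [Function.comp, hget]
          rw [elem_base ((List.lookup c ann).getD "3_NA")]
          rfl
  · rw [if_pos h, if_neg h]
    by_cases hn : PySem.Str.isIn "neuron" problem = true
    · rw [if_pos hn, if_pos hn]
      cases annotated with
      | none =>
          simp only [List.map_map]
          refine List.map_congr_left fun c _ => ?_
          simp only [Function.comp]
          simp only [elem_base]
          exact elem_neuron c
      | some ann =>
          simp only [List.map_map]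
          refine List.map_congr_left fun c _ => ?_
          simp only [Function.comp, hget]
          simp only [elem_base]
          exact elem_neuron ((List.lookup c ann).getD "3_NA")
    · rw [if_neg hn, if_neg hn]
      cases annotated with
      | none =>
          simp only [List.map_map]
          refine List.map_congr_left fun c _ => ?_
          simp only [Function.comp]
          simp only [elem_base]
          exact elem_binary c
      | some ann =>
          simp only [List.map_map]
          refine List.map_congr_left fun c _ => ?_
          simp only [Function.comp, hget]
          simp only [elem_base]
          exact elem_binary ((List.lookup c ann).getD "3_NA")

-- ===== VERDICT (by name: the statement is the Claim_ definition above) =====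
theorem convert_sample_to_label_spec : Claim_equal_convert_sample_to_label := by
  intro samples annotated problem _
  exact convert_sample_to_label_eq samples annotated problem
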